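-- pv_equiv track=rewrite | github.com/jungyoonoh/AlgorithmPractice | Python/Programmers/KAKAO_TEST/문자열압축.py | solution
-- ===== SOURCE A (Python) =====
-- def solution(s):
--     answer = 0
--     lenList = []
--     for i in range(1, len(s) // 2 + 1): # 패턴 길이
--         count = 1
--         find = s[:i]
--         res = ""
--         for j in range(i, len(s), i): # 찾기
--             if find == s[j:j+i]:
--                 count += 1
--             else:
--                 strZip = str(count) + find if count != 1 else find
--                 res += strZip
--                 find = s[j:j+i]
--                 count = 1
--
--         strZip = str(count) + find if count != 1 else find
--         res += strZip
--         lenList.append(len(res))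
--
--     if len(lenList) == 0:
--         answer = 1
--     else: answer = min(lenList)
--
--     return answer
-- ===== SOURCE B (Python) =====
-- def solution(s):
--     n = len(s)
--     best = None
--     for i in range(1, n // 2 + 1):
--         m = (n + i - 1) // i  # number of chunks
--         # run boundaries: chunk starts where the chunk differs from the previous chunk
--         starts = [0] + [k for k in range(i, n, i) if s[k:k+i] != s[k-i:k]]
--         ends = starts[1:] + [m * i]
--         total = 0
--         for a, b in zip(starts, ends):
--             cnt = (b - a) // i
--             total += min(i, n - a) + (len(str(cnt)) if cnt > 1 else 0)
--         if best is None or total < best: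
--             best = total
--     return 1 if best is None else best
-- ===== Notes on version B (the rewrite author's own statement) =====
-- stated objective: alternative
-- what changed: Instead of A's interleaved run-tracking loop that counts repeats and builds the compressed string, B computes for each chunk size the list of run BOUNDARIES (chunk starts whose chunk differs from the previous chunk), then derives each run's count arithmetically as (next_boundary - boundary) // i and its chunk length as min(i, n - boundary), summing numerically and tracking a running minimum; no run counter and no string are ever built.
import Mathlib
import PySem

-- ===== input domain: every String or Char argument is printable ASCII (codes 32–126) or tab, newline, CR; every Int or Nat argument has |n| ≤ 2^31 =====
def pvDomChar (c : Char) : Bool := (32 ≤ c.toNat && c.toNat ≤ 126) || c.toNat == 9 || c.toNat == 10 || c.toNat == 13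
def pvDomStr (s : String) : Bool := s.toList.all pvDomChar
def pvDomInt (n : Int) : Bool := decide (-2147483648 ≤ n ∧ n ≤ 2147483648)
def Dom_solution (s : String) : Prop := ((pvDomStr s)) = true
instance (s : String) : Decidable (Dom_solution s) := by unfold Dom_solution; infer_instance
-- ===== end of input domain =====

-- B replaces A's run-tracking string-building loop by computing, per chunk size, the run
-- BOUNDARIES (positions where a chunk differs from its predecessor) and deriving each run's
-- count arithmetically from consecutive boundaries (objective: alternative decomposition).

-- ===== PORT A =====
-- literal transliteration of A: outer loop over pattern lengths i, inner manual run-counting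
-- loop over j building the compressed string res, collecting len(res); min at the end.
def solution (s : String) : Int :=
  let cs := s.toList
  let n : Int := cs.length
  let lenList : List Int :=
    (PySem.List.pyRange 1 (PySem.Int.floordiv n 2 + 1) 1).foldl
      (fun lenList i =>
        let st :=
          (PySem.List.pyRange i n i).foldl
            (fun (st : Int × List Char × List Char) j =>
              if st.2.1 == PySem.List.slice cs (some j) (some (j + i)) then
                (st.1 + 1, st.2.1, st.2.2)
              else
                (1, PySem.List.slice cs (some j) (some (j + i)),
                 st.2.2 ++ (if st.1 ≠ 1 then PySem.Int.toChars st.1 ++ st.2.1 else st.2.1)))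
            (1, PySem.List.slice cs none (some i), ([] : List Char))
        lenList ++ [((st.2.2 ++ (if st.1 ≠ 1 then PySem.Int.toChars st.1 ++ st.2.1 else st.2.1)).length : Int)])
      []
  if lenList.length = 0 then 1 else (PySem.List.min? lenList id).getD 0

-- ===== PORT B =====
-- literal transliteration of B: per chunk size, the run-start boundary list (chunk start k is a
-- boundary iff the chunk differs from the previous one), then one pass over consecutive
-- boundary pairs: run count = (b - a) // i, run chunk length = min(i, n - a); running minimum.
def solution_alt (s : String) : Int :=
  let cs := s.toList
  let n : Int := cs.length
  let best : Option Int :=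
    (PySem.List.pyRange 1 (PySem.Int.floordiv n 2 + 1) 1).foldl
      (fun best i =>
        let m := PySem.Int.floordiv (n + i - 1) i
        let starts := 0 :: (PySem.List.pyRange i n i).filter
          (fun k => !(PySem.List.slice cs (some k) (some (k + i)) ==
                      PySem.List.slice cs (some (k - i)) (some k)))
        let ends := starts.tail ++ [m * i]
        let total := (starts.zip ends).foldl
          (fun total ab =>
            let cnt := PySem.Int.floordiv (ab.2 - ab.1) i
            total + (min i (n - ab.1) +
              (if 1 < cnt then ((PySem.Int.toChars cnt).length : Int) else 0)))
          0
        match best with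
        | none => some total
        | some b => if total < b then some total else some b)
      none
  best.getD 1

-- ===== PRECONDITION & SPEC =====
def Spec_solution (s : String) (out : Int) : Prop := out = solution_alt s
instance (s : String) (out : Int) : Decidable (Spec_solution s out) := by unfold Spec_solution; infer_instance

-- ===== CLAIM (what is proved, stated in full; the proofs are below) =====
def Claim_equal_solution : Prop := ∀ (s : String), Dom_solution s → Spec_solution s (solution s)

-- ===== LEMMAS AND PROOFS =====

-- A's inner-loop step, over the chunk it reads at index j
def stepA (st : Int × List Char × List Char) (c : List Char) : Int × List Char × List Char :=
  if st.2.1 == c then (st.1 + 1, st.2.1, st.2.2)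
  else (1, c, st.2.2 ++ (if st.1 ≠ 1 then PySem.Int.toChars st.1 ++ st.2.1 else st.2.1))

-- A's final flush, as an Int length
def finishA (st : Int × List Char × List Char) : Int :=
  ((st.2.2 ++ (if st.1 ≠ 1 then PySem.Int.toChars st.1 ++ st.2.1 else st.2.1)).length : Int)

-- cost of one completed run, A's view (Int count, `count != 1` test)
def cost (find : List Char) (count : Int) : Int :=
  (find.length : Int) + (if count ≠ 1 then ((PySem.Int.toChars count).length : Int) else 0)

-- run-length cost of the remaining chunk list, with a pending run (find, count)
def runTotal (find : List Char) (count : Int) : List (List Char) → Int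
  | [] => cost find count
  | c :: l => if find == c then runTotal find (count + 1) l else cost find count + runTotal c 1 l

theorem finishA_foldl (l : List (List Char)) :
    ∀ (count : Int) (find res : List Char),
      finishA (l.foldl stepA (count, find, res)) = (res.length : Int) + runTotal find count l := by
  induction l with
  | nil =>
    intro count find res
    simp only [List.foldl_nil, finishA, runTotal, cost]
    split_ifs <;> push_cast [List.length_append] <;> ring
  | cons c l ih =>
    intro count find res
    simp only [List.foldl_cons, stepA, runTotal]
    by_cases h : find = c
    · subst h
      simp only [beq_self_eq_true, if_true]
      exact ih _ _ _
    · have hb : (find == c) = false := by simp [h]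
      simp only [hb, Bool.false_eq_true, if_false]
      rw [ih]
      unfold cost
      split_ifs <;> push_cast [List.length_append] <;> ring

-- B's view of one run's digit cost
def dig (c : Int) : Int := if 1 < c then ((PySem.Int.toChars c).length : Int) else 0

-- the chunk of cs of width i starting at chunk index j
def chunk (cs : List Char) (i : Int) (j : Nat) : List Char :=
  PySem.List.slice cs (some ((j : Int) * i)) (some ((j : Int) * i + i))

-- B's cost of one consecutive boundary pair (a, b): run chunk length + digit cost of count b - a
def pcost (f : Nat → List Char) (ab : Nat × Nat) : Int :=
  ((f ab.1).length : Int) + dig ((ab.2 : Int) - (ab.1 : Int))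

-- consecutive pairs of a list (what zip(starts, ends) traverses)
def pairsL {α : Type} : List α → List (α × α)
  | a :: b :: r => (a, b) :: pairsL (b :: r)
  | _ => []

-- break positions: position s is a break iff f s differs from the previous chunk (carried as prev)
def brkP (f : Nat → List Char) : List Char → Nat → Nat → List Nat
  | _, _, 0 => []
  | prev, s, t+1 => if f s == prev then brkP f (f s) (s+1) t else s :: brkP f (f s) (s+1) t

theorem zip_consec {α : Type} :
    ∀ (xs : List α) (x e : α), (x :: xs).zip (xs ++ [e]) = pairsL (x :: (xs ++ [e])) := by
  intro xs
  induction xs with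
  | nil => intro x e; simp [pairsL]
  | cons b r ih => intro x e; simp only [List.cons_append, List.zip_cons_cons, pairsL]; rw [← ih]

theorem brkP_eq_filter (f : Nat → List Char) :
    ∀ (t s : Nat), brkP f (f s) (s+1) t = (List.range' (s+1) t).filter (fun j => !(f j == f (j-1))) := by
  intro t
  induction t with
  | zero => intro s; simp [brkP]
  | succ t ih =>
    intro s
    rw [List.range'_succ]
    by_cases h : f (s+1) = f s
    · simp only [brkP, h, beq_self_eq_true]
      rw [List.filter_cons]
      simp only [Nat.add_sub_cancel, h, beq_self_eq_true, Bool.not_true, Bool.false_eq_true,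
        if_false]
      rw [← h]
      exact ih (s+1)
    · have hb : (f (s+1) == f s) = false := by simp [h]
      rw [List.filter_cons]
      simp only [brkP, hb, Nat.add_sub_cancel, Bool.not_false, Bool.false_eq_true, if_false,
        if_true]
      rw [ih (s+1)]

theorem cost_eq_dig (find : List Char) (d : Nat) :
    cost find ((d : Int) + 1) = (find.length : Int) + dig ((d : Int) + 1) := by
  unfold cost dig
  by_cases h : d = 0
  · simp [h]
  · have h1 : ((d : Int) + 1) ≠ 1 := by omega
    have h2 : (1 : Int) < (d : Int) + 1 := by omega
    simp [h1, h2]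

theorem core (f : Nat → List Char) :
    ∀ (t a0 d : Nat), (∀ k, k ≤ d → f (a0 + k) = f a0) →
      ((pairsL (a0 :: (brkP f (f (a0+d)) (a0+d+1) t ++ [a0+d+1+t]))).map (pcost f)).sum
        = runTotal (f a0) ((d : Int) + 1) ((List.range' (a0+d+1) t).map f) := by
  intro t
  induction t with
  | zero =>
    intro a0 d h
    simp only [brkP, List.nil_append, pairsL, List.map_cons, List.map_nil, List.sum_cons,
      List.sum_nil, List.range'_zero, runTotal]
    rw [cost_eq_dig]
    simp only [pcost]
    have e : ((a0 + d + 1 + 0 : Nat) : Int) - (a0 : Int) = (d : Int) + 1 := by push_cast; ring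
    rw [e]
    ring
  | succ t ih =>
    intro a0 d h
    have hprev : f (a0 + d) = f a0 := h d (le_refl d)
    rw [List.range'_succ, List.map_cons]
    by_cases hc : f (a0 + d + 1) = f a0
    · have hb : (f (a0+d+1) == f (a0+d)) = true := by simp [hprev, hc]
      have hb2 : (f a0 == f (a0+d+1)) = true := by simp [hc]
      rw [show brkP f (f (a0+d)) (a0+d+1) (t+1)
            = brkP f (f (a0+d+1)) (a0+d+2) t from by rw [brkP, hb, if_pos rfl]]
      rw [runTotal, hb2, if_pos rfl]
      have h' : ∀ k, k ≤ d + 1 → f (a0 + k) = f a0 := by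
        intro k hk
        rcases Nat.lt_or_ge k (d+1) with hk' | hk'
        · exact h k (by omega)
        · have : k = d + 1 := by omega
          subst this; exact hc
      have := ih a0 (d+1) h'
      rw [show a0 + (d+1) = a0 + d + 1 from by omega] at this
      rw [show a0 + d + 1 + 1 = a0 + d + 2 from by omega] at this
      rw [show a0 + d + 2 + t = a0 + d + 1 + (t+1) from by omega] at this
      rw [show (((d+1 : Nat)) : Int) = (d : Int) + 1 from by push_cast; ring] at this
      exact this
    · have hb : (f (a0+d+1) == f (a0+d)) = false := by
        simp [hprev]; exact fun e => hc e
      have hb2 : (f a0 == f (a0+d+1)) = false := by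
        simp; exact fun e => hc e.symm
      rw [show brkP f (f (a0+d)) (a0+d+1) (t+1)
            = (a0+d+1) :: brkP f (f (a0+d+1)) (a0+d+2) t from by rw [brkP, hb]; simp]
      rw [runTotal, hb2]
      simp only [Bool.false_eq_true, if_false]
      have h0 : ∀ k, k ≤ 0 → f ((a0+d+1) + k) = f (a0+d+1) := by
        intro k hk; exact congrArg f (by omega)
      have := ih (a0+d+1) 0 h0
      rw [show a0 + d + 1 + 0 = a0 + d + 1 from by omega] at this
      rw [show a0 + d + 1 + 1 = a0 + d + 2 from by omega] at this
      simp only [Nat.cast_zero, zero_add] at this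
      rw [List.cons_append, pairsL, List.map_cons, List.sum_cons]
      rw [show a0 + d + 1 + (t+1) = a0 + d + 2 + t from by omega]
      rw [this]
      rw [cost_eq_dig]
      have e : ((a0 + d + 1 : Nat) : Int) - (a0 : Int) = (d : Int) + 1 := by push_cast; ring
      simp only [pcost, e]

-- length of the chunk at index a, as B computes it
theorem chunk_len (cs : List Char) (i : Int) (a : Nat) (hi : 1 ≤ i)
    (ha : (a : Int) * i ≤ (cs.length : Int) - 1) :
    ((chunk cs i a).length : Int) = min i ((cs.length : Int) - (a : Int) * i) := by
  unfold chunk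
  rw [PySem.List.length_slice]
  have h0 : (0 : Int) ≤ (a : Int) * i := by positivity
  unfold PySem.List.clampIdx
  rw [if_neg (by omega), if_neg (by omega)]
  omega

-- the members of pairsL (x :: xs ++ [e]) have their first component in x :: xs
theorem pairsL_fst_mem {α : Type} (x e : α) (xs : List α) (ab : α × α)
    (hm : ab ∈ pairsL (x :: (xs ++ [e]))) : ab.1 ∈ x :: xs := by
  rw [← zip_consec] at hm
  obtain ⟨a, b⟩ := ab
  exact (List.of_mem_zip hm).1

-- first chunk, as A reads it
theorem chunk_zero (cs : List Char) (i : Int) :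
    chunk cs i 0 = PySem.List.slice cs none (some i) := by
  simp [chunk]

-- the minimum tracker loop of B is min? of the mapped list
theorem tracker_eq_min? (R : List Int) (h : Int → Int) :
    R.foldl (fun best i => match best with
      | none => some (h i)
      | some b => if h i < b then some (h i) else some b) none
      = PySem.List.min? (R.map h) id := by
  rw [PySem.List.min?, List.foldl_map]
  apply PySem.List.foldl_congr_mem
  intro acc x _
  cases acc <;> simp

theorem foldl_min_step (f : Option Int → Int → Option Int)
    (hf : ∀ a y, ∃ b, f (some a) y = some b) :
    ∀ (t : List Int) (a : Int), (List.foldl f (some a) t).isSome := by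
  intro t
  induction t with
  | nil => intro a; rfl
  | cons y t ih =>
    intro a
    rw [List.foldl_cons]
    obtain ⟨b, hb⟩ := hf a y
    rw [hb]
    exact ih b

theorem final_min (T : List Int) :
    (if T.length = 0 then (1 : Int) else (PySem.List.min? T id).getD 0) =
      (PySem.List.min? T id).getD 1 := by
  cases T with
  | nil => simp [PySem.List.min?]
  | cons x t =>
    simp only [List.length_cons, Nat.succ_ne_zero, if_false]
    have hs : (PySem.List.min? (x :: t) id).isSome := by
      unfold PySem.List.min?
      rw [List.foldl_cons]
      exact foldl_min_step _ (by
        intro a y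
        by_cases h : id y < id a
        · exact ⟨y, if_pos h⟩
        · exact ⟨a, if_neg h⟩) t x
    obtain ⟨m, hm⟩ := Option.isSome_iff_exists.mp hs
    simp [hm]

theorem perI_eq (cs : List Char) (i : Int) (h1 : 1 ≤ i) (h2 : i * 2 ≤ (cs.length : Int)) :
    ((((PySem.List.pyRange i (cs.length : Int) i).foldl
        (fun (st : Int × List Char × List Char) j =>
          if st.2.1 == PySem.List.slice cs (some j) (some (j + i)) then
            (st.1 + 1, st.2.1, st.2.2)
          else
            (1, PySem.List.slice cs (some j) (some (j + i)),
             st.2.2 ++ (if st.1 ≠ 1 then PySem.Int.toChars st.1 ++ st.2.1 else st.2.1)))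
        (1, PySem.List.slice cs none (some i), ([] : List Char))).2.2 ++
      (if ((PySem.List.pyRange i (cs.length : Int) i).foldl
        (fun (st : Int × List Char × List Char) j =>
          if st.2.1 == PySem.List.slice cs (some j) (some (j + i)) then
            (st.1 + 1, st.2.1, st.2.2)
          else
            (1, PySem.List.slice cs (some j) (some (j + i)),
             st.2.2 ++ (if st.1 ≠ 1 then PySem.Int.toChars st.1 ++ st.2.1 else st.2.1)))
        (1, PySem.List.slice cs none (some i), ([] : List Char))).1 ≠ 1 then
        PySem.Int.toChars ((PySem.List.pyRange i (cs.length : Int) i).foldl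
          (fun (st : Int × List Char × List Char) j =>
            if st.2.1 == PySem.List.slice cs (some j) (some (j + i)) then
              (st.1 + 1, st.2.1, st.2.2)
            else
              (1, PySem.List.slice cs (some j) (some (j + i)),
               st.2.2 ++ (if st.1 ≠ 1 then PySem.Int.toChars st.1 ++ st.2.1 else st.2.1)))
          (1, PySem.List.slice cs none (some i), ([] : List Char))).1 ++
          ((PySem.List.pyRange i (cs.length : Int) i).foldl
            (fun (st : Int × List Char × List Char) j =>
              if st.2.1 == PySem.List.slice cs (some j) (some (j + i)) then
                (st.1 + 1, st.2.1, st.2.2)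
              else
                (1, PySem.List.slice cs (some j) (some (j + i)),
                 st.2.2 ++ (if st.1 ≠ 1 then PySem.Int.toChars st.1 ++ st.2.1 else st.2.1)))
            (1, PySem.List.slice cs none (some i), ([] : List Char))).2.1
       else
        ((PySem.List.pyRange i (cs.length : Int) i).foldl
          (fun (st : Int × List Char × List Char) j =>
            if st.2.1 == PySem.List.slice cs (some j) (some (j + i)) then
              (st.1 + 1, st.2.1, st.2.2)
            else
              (1, PySem.List.slice cs (some j) (some (j + i)),
               st.2.2 ++ (if st.1 ≠ 1 then PySem.Int.toChars st.1 ++ st.2.1 else st.2.1)))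
          (1, PySem.List.slice cs none (some i), ([] : List Char))).2.1)).length : Int) =
    ((0 :: (PySem.List.pyRange i (cs.length : Int) i).filter
        (fun k => !(PySem.List.slice cs (some k) (some (k + i)) ==
                    PySem.List.slice cs (some (k - i)) (some k)))).zip
      (((0 :: (PySem.List.pyRange i (cs.length : Int) i).filter
        (fun k => !(PySem.List.slice cs (some k) (some (k + i)) ==
                    PySem.List.slice cs (some (k - i)) (some k)))).tail) ++
        [PySem.Int.floordiv ((cs.length : Int) + i - 1) i * i])).foldl
      (fun total ab =>
        total + (min i ((cs.length : Int) - ab.1) +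
          (if 1 < PySem.Int.floordiv (ab.2 - ab.1) i then
            ((PySem.Int.toChars (PySem.Int.floordiv (ab.2 - ab.1) i)).length : Int) else 0)))
      0 := by
  have hi0 : (0:Int) < i := by omega
  have hn2 : 2 ≤ (cs.length : Int) := by omega
  have hilt : i < (cs.length : Int) := by omega
  set n : Int := (cs.length : Int) with hn
  set t : Nat := ((n-1)/i).toNat with htdef
  have ht : (t : Int) = (n-1)/i := Int.toNat_of_nonneg (Int.ediv_nonneg (by omega) (by omega))
  have hti : (t : Int) * i ≤ n - 1 := by rw [ht]; exact Int.ediv_mul_le _ (by omega)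
  set f : Nat → List Char := chunk cs i with hf
  have hsl : ∀ (a b : Int) (j : Nat), a = (j : Int) * i → b = (j : Int) * i + i →
      PySem.List.slice cs (some a) (some b) = f j := by
    rintro a b j rfl rfl; rfl
  have hrange : PySem.List.pyRange i n i
      = (List.range t).map (fun k : Nat => i + i * (k : Int)) := by
    rw [PySem.List.pyRange_of_pos _ _ hi0, if_pos hilt]
    rw [show n - i + i - 1 = n - 1 from by ring, htdef]
  -- ===== A side =====
  have e1 : (fun (st : Int × List Char × List Char) j =>
      if st.2.1 == PySem.List.slice cs (some j) (some (j + i)) then (st.1 + 1, st.2.1, st.2.2)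
      else (1, PySem.List.slice cs (some j) (some (j + i)),
        st.2.2 ++ (if st.1 ≠ 1 then PySem.Int.toChars st.1 ++ st.2.1 else st.2.1)))
      = (fun st j => stepA st (PySem.List.slice cs (some j) (some (j + i)))) := rfl
  rw [e1, ← List.foldl_map (f := fun j => PySem.List.slice cs (some j) (some (j + i))) (g := stepA)]
  have hAfold := finishA_foldl ((PySem.List.pyRange i n i).map
      (fun j => PySem.List.slice cs (some j) (some (j + i)))) 1
      (PySem.List.slice cs none (some i)) []
  simp only [finishA, List.length_nil, Nat.cast_zero, zero_add] at hAfold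
  rw [hAfold]
  have hchunks : (PySem.List.pyRange i n i).map (fun j => PySem.List.slice cs (some j) (some (j + i)))
      = (List.range' 1 t).map f := by
    rw [hrange, List.map_map, List.range'_eq_map_range, List.map_map]
    apply List.map_congr_left
    intro k _
    exact hsl _ _ (1+k) (by push_cast; ring) (by push_cast; ring)
  rw [hchunks, show PySem.List.slice cs none (some i) = f 0 from (chunk_zero cs i).symm]
  have gcore := core f t 0 0 (by intro k hk; exact congrArg f (by omega))
  norm_num at gcore
  rw [← gcore]
  -- ===== B side =====
  set q : Nat → Bool := fun k => !(f (k+1) == f k) with hq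
  set B' : List Nat := ((List.range t).filter q).map (fun k => k+1) with hB'def
  have hstarts : (PySem.List.pyRange i n i).filter
      (fun k => !(PySem.List.slice cs (some k) (some (k + i)) ==
                  PySem.List.slice cs (some (k - i)) (some k)))
      = B'.map (fun j : Nat => (j : Int) * i) := by
    rw [hrange, List.filter_map]
    rw [List.filter_congr (fun k _ => by
      show (!(PySem.List.slice cs (some (i + i*(k:Int))) (some (i + i*(k:Int) + i)) ==
             PySem.List.slice cs (some (i + i*(k:Int) - i)) (some (i + i*(k:Int))))) = q k
      rw [hsl _ _ (k+1) (by push_cast; ring) (by push_cast; ring),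
          hsl _ _ k (by ring) (by ring)])]
    rw [hB'def, List.map_map]
    apply List.map_congr_left
    intro k _
    show i + i * (k:Int) = ((k+1 : Nat) : Int) * i
    push_cast; ring
  rw [hstarts]
  have hm : PySem.Int.floordiv (n + i - 1) i * i = ((t+1 : Nat) : Int) * i := by
    rw [PySem.Int.floordiv_eq_ediv_of_pos hi0,
        show n + i - 1 = (n - 1) + 1 * i from by ring,
        Int.add_mul_ediv_right _ _ (by omega : i ≠ 0), ← ht]
    push_cast; ring
  rw [hm]
  rw [show (0 : Int) :: B'.map (fun j : Nat => (j : Int) * i)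
        = ((0 :: B').map (fun j : Nat => (j : Int) * i)) from by simp]
  rw [show ((0 :: B').map (fun j : Nat => (j : Int) * i)).tail
        = B'.map (fun j : Nat => (j : Int) * i) from by simp,
      show B'.map (fun j : Nat => (j : Int) * i) ++ [((t+1 : Nat) : Int) * i]
        = ((B' ++ [t+1]).map (fun j : Nat => (j : Int) * i)) from by simp]
  rw [List.zip_map, zip_consec, List.foldl_map]
  rw [PySem.List.foldl_congr_mem _ _ (fun (tot : Int) (ab : Nat × Nat) => tot + pcost f ab) _ ?hcong]
  case hcong =>
    intro acc ab hm2
    have ha : ab.1 ≤ t := by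
      have h1 : ab.1 ∈ 0 :: B' := pairsL_fst_mem _ _ _ _ hm2
      rcases List.mem_cons.mp h1 with h | h
      · omega
      · rw [hB'def] at h
        obtain ⟨k, hk, hke⟩ := List.mem_map.mp h
        have := List.mem_range.mp (List.mem_filter.mp hk).1
        omega
    have hai : (ab.1 : Int) * i ≤ n - 1 :=
      le_trans (mul_le_mul_of_nonneg_right (by exact_mod_cast ha) (by omega)) hti
    have hfd : PySem.Int.floordiv ((Prod.map (fun j : Nat => (j : Int) * i) (fun j : Nat => (j : Int) * i) ab).2
        - (Prod.map (fun j : Nat => (j : Int) * i) (fun j : Nat => (j : Int) * i) ab).1) i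
        = (ab.2 : Int) - (ab.1 : Int) := by
      simp only [Prod.map]
      rw [show (ab.2 : Int) * i - (ab.1 : Int) * i = ((ab.2 : Int) - ab.1) * i from by ring,
          PySem.Int.floordiv_eq_ediv_of_pos hi0, Int.mul_ediv_cancel _ (by omega)]
    rw [hfd]
    simp only [Prod.map]
    rw [show min i (n - (ab.1 : Int) * i) = ((f ab.1).length : Int) from
      (chunk_len cs i ab.1 (by omega) hai).symm]
    simp [pcost, dig]
  rw [PySem.List.foldl_add, zero_add]
  have hBbrk : B' = brkP f (f 0) 1 t := by
    rw [brkP_eq_filter, List.range'_eq_map_range, List.filter_map, hB'def]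
    rw [List.filter_congr (fun k _ => by
      show q k = ((fun j => !(f j == f (j-1))) ∘ (fun x => 1+x)) k
      simp only [Function.comp, hq]
      rw [show 1 + k - 1 = k from by omega, Nat.add_comm])]
    apply List.map_congr_left
    intro k _
    omega
  rw [hBbrk]
  rw [show t + 1 = 1 + t from by omega]

-- ===== VERDICT (by name: the statement is the Claim_ definition above) =====
theorem solution_spec : Claim_equal_solution := by
  intro s _
  show solution s = solution_alt s
  simp only [solution, solution_alt]
  rw [PySem.List.foldl_append_singleton_eq_map, List.nil_append]
  rw [tracker_eq_min?]
  rw [List.map_congr_left (fun i hi => perI_eq s.toList i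
    (by exact (PySem.List.mem_pyRange_one.mp hi).1)
    (by
      have h := PySem.List.mem_pyRange_one.mp hi
      have h2 := (PySem.Int.le_floordiv_iff_mul_le (a := (s.toList.length : Int)) (q := i)
        (by norm_num : (0:Int) < 2)).mp (by omega)
      exact h2))]
  exact final_min _
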